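-- pv_equiv track=rewrite | github.com/paterake/elt_llm_rag | elt_llm_query/src/elt_llm_query/query.py | _reorder_for_lost_in_middle
-- ===== SOURCE A (Python) =====
-- def _reorder_for_lost_in_middle(nodes: list) -> list:
--     """Reorder context chunks to mitigate the lost-in-the-middle effect.
--
--     LLMs attend best to content at the start and end of the context window.
--     This interleaves reranked chunks so the most-relevant appear at both ends:
--
--         Input  (best→worst): [A, B, C, D, E, F, G, H]
--         Output:              [A, C, E, G, H, F, D, B]
--
--     The highest-scoring chunk goes to position 0, second-highest to position -1,
--     third-highest to position 1, and so on.
--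
--     Reference: Liu et al. (2023), "Lost in the Middle".
--     """
--     if len(nodes) <= 2:
--         return nodes
--     result: list = [None] * len(nodes)
--     left, right = 0, len(nodes) - 1
--     for i, node in enumerate(nodes):
--         if i % 2 == 0:
--             result[left] = node
--             left += 1
--         else:
--             result[right] = node
--             right -= 1
--     return result
-- ===== SOURCE B (Python) =====
-- def _reorder_for_lost_in_middle(nodes: list) -> list:
--     """Reorder context chunks to mitigate the lost-in-the-middle effect.
--
--     Even-indexed nodes (by rank) go to the front in order; odd-indexed nodes
--     form the back in reverse order.  Two slices and a concatenation replace
--     the index-juggling interleave pass.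
--     """
--     if len(nodes) <= 2:
--         return nodes
--     return nodes[::2] + nodes[1::2][::-1]
-- ===== Notes on version B (the rewrite author's own statement) =====
-- stated objective: simpler
-- what changed: Replaces the preallocated result array with two-pointer index bookkeeping by a direct construction: the even-indexed slice concatenated with the reversed odd-indexed slice.
import Mathlib
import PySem

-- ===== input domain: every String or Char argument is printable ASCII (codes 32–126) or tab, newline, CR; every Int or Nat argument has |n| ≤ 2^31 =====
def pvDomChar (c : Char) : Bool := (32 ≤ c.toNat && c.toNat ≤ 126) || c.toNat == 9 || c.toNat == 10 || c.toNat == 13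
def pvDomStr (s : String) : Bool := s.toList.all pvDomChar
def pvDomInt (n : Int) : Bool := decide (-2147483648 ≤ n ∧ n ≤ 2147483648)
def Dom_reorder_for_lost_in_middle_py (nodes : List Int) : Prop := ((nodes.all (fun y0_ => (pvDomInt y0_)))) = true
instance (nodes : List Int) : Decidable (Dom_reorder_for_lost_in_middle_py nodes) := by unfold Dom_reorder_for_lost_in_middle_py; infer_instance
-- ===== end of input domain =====

-- B builds the result as the even-indexed slice followed by the reversed odd-indexed
-- slice, instead of A's single interleaving pass into a preallocated array (objective: simpler).


-- ===== PORT A =====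
-- literal port of A: early return for len <= 2, else a preallocated result list
-- (Python's [None]*n; placeholder 0 is never read back — the loop overwrites every
-- cell) filled by one enumerate loop writing even indices at `left` (advancing) and
-- odd indices at `right` (retreating); result[left] = node is pySetD (always in range).
def reorder_for_lost_in_middle_py (nodes : List Int) : List Int :=
  if nodes.length ≤ 2 then nodes
  else
    ((PySem.List.enumerate nodes).foldl
      (fun (st : List Int × Int × Int) iv =>
        if PySem.Int.mod iv.1 2 == 0 then
          (PySem.List.pySetD st.1 st.2.1 iv.2, st.2.1 + 1, st.2.2)
        else
          (PySem.List.pySetD st.1 st.2.2 iv.2, st.2.1, st.2.2 - 1))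
      (List.replicate nodes.length 0, 0, (nodes.length : Int) - 1)).1

-- ===== PORT B =====
-- literal port of B: nodes[::2] + nodes[1::2][::-1]; the strided slices are
-- PySem.List.slice? (step 2 ≠ 0, so never none) and [::-1] is List.reverse.
def reorder_for_lost_in_middle_py_alt (nodes : List Int) : List Int :=
  if nodes.length ≤ 2 then nodes
  else
    ((PySem.List.slice? nodes none none 2).getD []) ++
      (((PySem.List.slice? nodes (some 1) none 2).getD []).reverse)

-- ===== PRECONDITION & SPEC =====
def Spec_reorder_for_lost_in_middle_py (nodes : List Int) (out : List Int) : Prop := out = reorder_for_lost_in_middle_py_alt nodes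
instance (nodes : List Int) (out : List Int) : Decidable (Spec_reorder_for_lost_in_middle_py nodes out) := by unfold Spec_reorder_for_lost_in_middle_py; infer_instance

-- ===== CLAIM (what is proved, stated in full; the proofs are below) =====
def Claim_equal_reorder_for_lost_in_middle_py : Prop := ∀ (nodes : List Int), Dom_reorder_for_lost_in_middle_py nodes → Spec_reorder_for_lost_in_middle_py nodes (reorder_for_lost_in_middle_py nodes)

-- ===== LEMMAS AND PROOFS =====

-- the even-indexed and odd-indexed sublists of a list
def pvEvens : List Int → List Int
  | [] => [] | [a] => [a] | a :: _ :: t => a :: pvEvens t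

def pvOdds : List Int → List Int
  | [] => [] | [_] => [] | _ :: b :: t => b :: pvOdds t

lemma pvEvens_aux (l : List Int) :
    List.filterMap (fun x => l[2 * x]?) (List.range ((l.length + 1) / 2)) = pvEvens l := by
  induction l using pvEvens.induct with
  | case1 => simp [pvEvens]
  | case2 a => simp [pvEvens]
  | case3 a b t ih =>
    have hc : ((a :: b :: t).length + 1) / 2 = (t.length + 1) / 2 + 1 := by
      simp; omega
    rw [hc, List.range_succ_eq_map, List.filterMap_cons, List.filterMap_map]
    have hf : ((fun x => (a :: b :: t)[2 * x]?) ∘ Nat.succ) = (fun x => t[2 * x]?) := by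
      funext x
      show (a :: b :: t)[2 * (x + 1)]? = t[2 * x]?
      rw [show 2 * (x + 1) = (2 * x) + 1 + 1 from by ring]
      simp
    rw [hf, ih]
    simp [pvEvens]

lemma pvOdds_aux (l : List Int) :
    List.filterMap (fun x => l[1 + 2 * x]?) (List.range (l.length / 2)) = pvOdds l := by
  induction l using pvOdds.induct with
  | case1 => simp [pvOdds]
  | case2 a => simp [pvOdds]
  | case3 a b t ih =>
    have hc : (a :: b :: t).length / 2 = t.length / 2 + 1 := by
      simp; omega
    rw [hc, List.range_succ_eq_map, List.filterMap_cons, List.filterMap_map]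
    have hf : ((fun x => (a :: b :: t)[1 + 2 * x]?) ∘ Nat.succ) = (fun x => t[1 + 2 * x]?) := by
      funext x
      show (a :: b :: t)[1 + 2 * (x + 1)]? = t[1 + 2 * x]?
      rw [show 1 + 2 * (x + 1) = (1 + 2 * x) + 1 + 1 from by ring]
      simp
    rw [hf, ih]
    simp [pvOdds]

-- nodes[::2] is the even-indexed sublist
lemma slice_evens (l : List Int) :
    (PySem.List.slice? l none none 2).getD [] = pvEvens l := by
  simp only [PySem.List.slice?, PySem.List.sliceIndices]
  norm_num
  have hc : (if 0 < l.length then (((l.length : Int) + 2 - 1) / 2).toNat else 0)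
      = (l.length + 1) / 2 := by split <;> omega
  have hf : (fun x : Nat => l[(2 * (x : Int)).toNat]?) = fun x => l[2 * x]? := by
    funext x; congr 1
  rw [hc, hf, pvEvens_aux]

-- nodes[1::2] is the odd-indexed sublist
lemma slice_odds (l : List Int) :
    (PySem.List.slice? l (some 1) none 2).getD [] = pvOdds l := by
  simp only [PySem.List.slice?, PySem.List.sliceIndices]
  norm_num
  cases l with
  | nil => simp [pvOdds]
  | cons a t =>
    have hc : (if 1 < (a :: t).length then
        (((((a :: t).length : Int)) - min 1 ((a :: t).length : Int) + 2 - 1) / 2).toNat else 0)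
        = (a :: t).length / 2 := by split <;> omega
    have hf : (fun x : Nat => (a :: t)[(min 1 (((a :: t).length : Int)) + 2 * (x : Int)).toNat]?)
        = fun x => (a :: t)[1 + 2 * x]? := by
      funext x; congr 1
      simp; omega
    rw [hc, hf, pvOdds_aux]

lemma set_replicate_last (n : Nat) (b : Int) :
    (List.replicate (n + 1) (0 : Int)).set n b = List.replicate n 0 ++ [b] := by
  induction n with
  | zero => simp
  | succ k ih =>
    rw [show List.replicate (k + 1 + 1) (0 : Int) = 0 :: List.replicate (k + 1) 0 from
      List.replicate_succ, List.set_cons_succ, ih]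
    simp [List.replicate_succ]

-- invariant of A's interleave pass: filling replicate-zeros framed by pre/suf
-- writes the even-indexed elements after pre and the reversed odd-indexed
-- elements before suf
lemma loopA (l : List Int) : ∀ (pre suf : List Int) (s : Int), s % 2 = 0 →
    (PySem.List.enumerate l s).foldl
      (fun (st : List Int × Int × Int) iv =>
        if PySem.Int.mod iv.1 2 == 0 then
          (PySem.List.pySetD st.1 st.2.1 iv.2, st.2.1 + 1, st.2.2)
        else
          (PySem.List.pySetD st.1 st.2.2 iv.2, st.2.1, st.2.2 - 1))
      (pre ++ List.replicate l.length 0 ++ suf, (pre.length : Int),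
        (pre.length : Int) + (l.length : Int) - 1)
    = (pre ++ pvEvens l ++ (pvOdds l).reverse ++ suf,
        (pre.length : Int) + ((pvEvens l).length : Int),
        (pre.length : Int) + (l.length : Int) - 1 - ((pvOdds l).length : Int)) := by
  induction l using pvEvens.induct with
  | case1 =>
    intro pre suf s hs
    simp [PySem.List.enumerate, pvEvens, pvOdds]
  | case2 a =>
    intro pre suf s hs
    have hmod : PySem.Int.mod s 2 = 0 := by
      rw [PySem.Int.mod_eq_emod_of_pos (by norm_num : (0:Int) < 2)]; omega
    simp [PySem.List.enumerate_cons, PySem.List.enumerate_nil, pvEvens, pvOdds,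
      PySem.List.pySetD_natCast]
    omega
  | case3 a b t ih =>
    intro pre suf s hs
    have hmod : PySem.Int.mod s 2 = 0 := by
      rw [PySem.Int.mod_eq_emod_of_pos (by norm_num : (0:Int) < 2)]; omega
    have hmod1 : PySem.Int.mod (s + 1) 2 = 1 := by
      rw [PySem.Int.mod_eq_emod_of_pos (by norm_num : (0:Int) < 2)]; omega
    simp only [PySem.List.enumerate_cons, List.foldl_cons, hmod, hmod1,
      beq_self_eq_true, if_true, show ((1:Int) == 0) = false from rfl,
      Bool.false_eq_true, if_false]
    have h1 : PySem.List.pySetD (pre ++ List.replicate (a :: b :: t).length 0 ++ suf)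
        (pre.length : Int) a = (pre ++ [a]) ++ List.replicate (t.length + 1) 0 ++ suf := by
      simp [PySem.List.pySetD_natCast, List.replicate_succ]
    rw [h1]
    have h2 : PySem.List.pySetD ((pre ++ [a]) ++ List.replicate (t.length + 1) 0 ++ suf)
        ((pre.length : Int) + ((a :: b :: t).length : Int) - 1) b
        = (pre ++ [a]) ++ List.replicate t.length 0 ++ (b :: suf) := by
      rw [show ((pre.length : Int) + ((a :: b :: t).length : Int) - 1)
          = ((pre.length + 1 + t.length : Nat) : Int) from by
            simp only [List.length_cons]; push_cast; omega,
        PySem.List.pySetD_natCast]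
      rw [show (pre ++ [a]) ++ List.replicate (t.length + 1) 0 ++ suf
          = (pre ++ [a]) ++ (List.replicate (t.length + 1) 0 ++ suf) from by simp,
        show pre.length + 1 + t.length = (pre ++ [a]).length + t.length from by simp,
        List.set_append, if_neg (by omega),
        show (pre ++ [a]).length + t.length - (pre ++ [a]).length = t.length from by omega,
        List.set_append, if_pos (by simp), set_replicate_last]
      simp
    rw [h2]
    have harg1 : (pre.length : Int) + 1 = (((pre ++ [a]).length : Int)) := by simp
    have harg2 : (pre.length : Int) + ((a :: b :: t).length : Int) - 1 - 1
        = (((pre ++ [a]).length : Int)) + (t.length : Int) - 1 := by simp; omega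
    rw [harg1, harg2, ih (pre ++ [a]) (b :: suf) (s + 1 + 1) (by omega)]
    simp [pvEvens, pvOdds]
    omega

-- ===== VERDICT (by name: the statement is the Claim_ definition above) =====
theorem reorder_for_lost_in_middle_py_spec : Claim_equal_reorder_for_lost_in_middle_py := by
  intro nodes _
  unfold Spec_reorder_for_lost_in_middle_py reorder_for_lost_in_middle_py reorder_for_lost_in_middle_py_alt
  by_cases h : nodes.length ≤ 2
  · simp [h]
  · simp only [h, if_false]
    rw [slice_evens, slice_odds]
    have := loopA nodes [] [] 0 (by decide)
    simpa using congrArg Prod.fst this
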